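-- pv_equiv track=rewrite | github.com/okanasl/MicroBoiler | src/app.py | filter_sub_region
-- ===== SOURCE A (Python) =====
-- def filter_sub_region(
--     file,
--     parent_marker,
--     child_marker):
--     lines = iter(file)
--     parent_marker_start = 'region ('+parent_marker+':'
--     child_marker_start = 'region ('+parent_marker+':'+child_marker
--     child_marker_end = 'end ('+parent_marker+':'+child_marker
--     parent_marker_end = 'end ('+parent_marker+':'
--     try:
--         while True:
--             line = next(lines)
--             if parent_marker_start in line and child_marker not in line:
--                 while parent_marker_end not in line:
--                     line = next(lines)
--             yield line
--     except StopIteration: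
--         return
-- ===== SOURCE B (Python) =====
-- def filter_sub_region(file, parent_marker, child_marker):
--     parent_marker_start = 'region (' + parent_marker + ':'
--     parent_marker_end = 'end (' + parent_marker + ':'
--     skipping = False
--     for line in file:
--         if skipping:
--             if parent_marker_end in line:
--                 yield line
--                 skipping = False
--         elif parent_marker_start in line and child_marker not in line:
--             if parent_marker_end in line:
--                 yield line
--             else:
--                 skipping = True
--         else:
--             yield line
-- ===== Notes on version B (the rewrite author's own statement) =====
-- stated objective: idiomatic
-- what changed: Replaced the iter/next pump with a nested while-until-end inner loop by a single flat for-loop over the lines that maintains one boolean skipping state.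
import Mathlib
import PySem

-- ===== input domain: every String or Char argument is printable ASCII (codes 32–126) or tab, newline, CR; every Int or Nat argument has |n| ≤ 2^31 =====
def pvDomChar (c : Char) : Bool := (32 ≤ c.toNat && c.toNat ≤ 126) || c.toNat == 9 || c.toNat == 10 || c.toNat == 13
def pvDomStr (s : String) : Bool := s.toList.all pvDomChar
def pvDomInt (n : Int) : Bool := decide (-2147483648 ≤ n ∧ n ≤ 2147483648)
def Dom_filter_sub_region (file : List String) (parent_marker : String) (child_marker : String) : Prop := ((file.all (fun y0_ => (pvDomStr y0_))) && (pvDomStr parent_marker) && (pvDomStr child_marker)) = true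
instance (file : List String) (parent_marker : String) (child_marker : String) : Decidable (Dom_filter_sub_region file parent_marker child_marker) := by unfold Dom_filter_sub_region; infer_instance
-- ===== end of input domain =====

-- ===== PORT A =====
-- B changes only the loop decomposition (flat single-state loop instead of the nested
-- iter/next pump); same values on every input. Objective: idiomatic.
mutual
-- A's outer 'while True: line = next(lines)' loop
def pvGoA (pstart pend cm : String) : List String → List String
  | [] => []
  | line :: rest =>
    if PySem.Str.isIn pstart line && !(PySem.Str.isIn cm line) then
      pvSkipA pstart pend cm line rest
    else
      line :: pvGoA pstart pend cm rest
  termination_by xs => 2 * xs.length + 1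

-- A's inner 'while parent_marker_end not in line: line = next(lines)' followed by the yield
def pvSkipA (pstart pend cm : String) (line : String) (rest : List String) : List String :=
  if PySem.Str.isIn pend line then
    line :: pvGoA pstart pend cm rest
  else
    match rest with
    | [] => []
    | line' :: rest' => pvSkipA pstart pend cm line' rest'
  termination_by 2 * rest.length + 2
end

def filter_sub_region (file : List String) (parent_marker : String) (child_marker : String) : List String :=
  pvGoA ("region (" ++ parent_marker ++ ":") ("end (" ++ parent_marker ++ ":") child_marker file

-- ===== PORT B =====
-- B's flat 'for line in file' loop with the boolean skipping state
def pvLoopB (pstart pend cm : String) (skipping : Bool) : List String → List String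
  | [] => []
  | line :: rest =>
    if skipping then
      if PySem.Str.isIn pend line then line :: pvLoopB pstart pend cm false rest
      else pvLoopB pstart pend cm true rest
    else if PySem.Str.isIn pstart line && !(PySem.Str.isIn cm line) then
      if PySem.Str.isIn pend line then line :: pvLoopB pstart pend cm false rest
      else pvLoopB pstart pend cm true rest
    else
      line :: pvLoopB pstart pend cm false rest

def filter_sub_region_alt (file : List String) (parent_marker : String) (child_marker : String) : List String :=
  pvLoopB ("region (" ++ parent_marker ++ ":") ("end (" ++ parent_marker ++ ":") child_marker false file


def Spec_filter_sub_region (file : List String) (parent_marker : String) (child_marker : String) (out : List String) : Prop := out = filter_sub_region_alt file parent_marker child_marker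
instance (file : List String) (parent_marker : String) (child_marker : String) (out : List String) : Decidable (Spec_filter_sub_region file parent_marker child_marker out) := by unfold Spec_filter_sub_region; infer_instance

-- ===== CLAIM (what is proved, stated in full; the proofs are below) =====
def Claim_equal_filter_sub_region : Prop := ∀ (file : List String) (parent_marker : String) (child_marker : String), Dom_filter_sub_region file parent_marker child_marker → Spec_filter_sub_region file parent_marker child_marker (filter_sub_region file parent_marker child_marker)

-- ===== LEMMAS AND PROOFS =====
theorem pvGoA_eq (pstart pend cm : String) : ∀ (n : Nat) (xs : List String), xs.length ≤ n →
    (pvGoA pstart pend cm xs = pvLoopB pstart pend cm false xs ∧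
     ∀ line, pvSkipA pstart pend cm line xs =
       (if PySem.Str.isIn pend line then line :: pvLoopB pstart pend cm false xs
        else pvLoopB pstart pend cm true xs)) := by
  intro n
  induction n with
  | zero =>
    intro xs h
    have hx : xs = [] := List.eq_nil_of_length_eq_zero (Nat.le_zero.mp h)
    subst hx
    refine ⟨by rw [pvGoA, pvLoopB], fun line => ?_⟩
    rw [pvSkipA]
    split_ifs with he
    · rw [pvGoA, pvLoopB]
    · rw [pvLoopB]
  | succ n ih =>
    intro xs h
    cases xs with
    | nil =>
      refine ⟨by rw [pvGoA, pvLoopB], fun line => ?_⟩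
      rw [pvSkipA]
      split_ifs with he
      · rw [pvGoA, pvLoopB]
      · rw [pvLoopB]
    | cons l rest =>
      have hr : rest.length ≤ n := by
        simpa using Nat.lt_succ_iff.mp (Nat.lt_of_lt_of_le (by simp) h)
      obtain ⟨ihgo, ihskip⟩ := ih rest hr
      have hgo : pvGoA pstart pend cm (l :: rest) = pvLoopB pstart pend cm false (l :: rest) := by
        rw [pvGoA, pvLoopB, if_neg Bool.false_ne_true]
        by_cases hc : (PySem.Str.isIn pstart l && !PySem.Str.isIn cm l) = true
        · rw [if_pos hc, if_pos hc, ihskip l]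
        · rw [if_neg hc, if_neg hc, ihgo]
      refine ⟨hgo, fun line => ?_⟩
      rw [pvSkipA]
      by_cases he : PySem.Str.isIn pend line = true
      · rw [if_pos he, if_pos he, hgo]
      · rw [if_neg he, if_neg he]
        show pvSkipA pstart pend cm l rest = pvLoopB pstart pend cm true (l :: rest)
        rw [ihskip l, pvLoopB, if_pos rfl]

-- ===== VERDICT (by name: the statement is the Claim_ definition above) =====
theorem filter_sub_region_spec : Claim_equal_filter_sub_region := by
  intro file pm cm _
  unfold Spec_filter_sub_region filter_sub_region filter_sub_region_alt
  exact ((pvGoA_eq _ _ _ file.length file le_rfl).1)
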